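-- pv_equiv track=rewrite | github.com/ludwings0330/algo | 대회/2021 홍익대학교 프로그래밍 경진대회/D.py | solve
-- ===== SOURCE A (Python) =====
-- def solve(n, m):
--     if n == 1:
--         return m + 1
--
--     if n % 2 == 0:
--         return solve(n//2, m) + 1
--
--     elif n % 2 == 1:
--         if m > 0:
--             return solve((n+1)//2, m-1) + 1
--         else:
--             return solve(n//2, m) + 1
-- ===== SOURCE B (Python) =====
-- def solve(n, m):
--     # Two-phase re-implementation: while bonuses remain, take ceil-halving
--     # steps ((n+1)//2 equals n//2 for even n, and an odd step spends one m);
--     # once m is exhausted (or n hits 1) the remaining plain floor-halving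
--     # tail has exactly n.bit_length() - 1 steps, taken in closed form.
--     count = 0
--     while n > 1 and m > 0:
--         if n % 2:
--             m -= 1
--         n = (n + 1) // 2
--         count += 1
--     return count + (n.bit_length() - 1) + m + 1
-- ===== Notes on version B (the rewrite author's own statement) =====
-- stated objective: alternative
-- what changed: A's full recursion is replaced by a short loop that only spends the m ceil-halving steps, after which the remaining plain-halving tail is computed in closed form as n.bit_length() - 1.
import Mathlib
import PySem

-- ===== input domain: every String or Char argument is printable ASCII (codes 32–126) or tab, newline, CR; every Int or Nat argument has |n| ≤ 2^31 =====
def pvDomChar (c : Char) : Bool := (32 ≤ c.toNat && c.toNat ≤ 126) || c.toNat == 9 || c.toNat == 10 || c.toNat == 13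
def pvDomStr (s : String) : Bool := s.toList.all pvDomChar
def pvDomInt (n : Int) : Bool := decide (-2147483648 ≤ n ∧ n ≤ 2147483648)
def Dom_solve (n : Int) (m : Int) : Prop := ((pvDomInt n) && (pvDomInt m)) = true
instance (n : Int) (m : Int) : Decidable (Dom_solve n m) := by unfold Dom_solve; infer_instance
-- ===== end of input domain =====

-- B replaces A's full recursion by a short loop spending the m ceil-steps plus a closed-form
-- bit_length tail for the remaining plain halvings (alternative decomposition, same cost).

-- ===== PORT A =====
-- A's recursion, with a fuel guard for totality only: on Pre_ (n ≥ 1) with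
-- Dom (n ≤ 2^31), 64 halving steps always reach n = 1 before the fuel does.
def solveFuel (fuel : Nat) (n : Int) (m : Int) : Int :=
  match fuel with
  | 0 => m + 1  -- fuel exhausted: unreachable for n ≥ 1 with fuel 64 on Dom
  | f + 1 =>
    if n = 1 then m + 1
    else if PySem.Int.mod n 2 = 0 then solveFuel f (PySem.Int.floordiv n 2) m + 1
    else if m > 0 then solveFuel f (PySem.Int.floordiv (n + 1) 2) (m - 1) + 1
    else solveFuel f (PySem.Int.floordiv n 2) m + 1

def solve (n : Int) (m : Int) : Int := solveFuel 64 n m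

-- ===== PORT B =====
-- B's while-loop: ceil-halve while n > 1 and m > 0 (an odd step spends one m),
-- then add the closed-form tail bit_length(n) - 1 plus m + 1.
def solveAltLoop (fuel : Nat) (n : Int) (m : Int) (count : Int) : Int :=
  match fuel with
  | 0 => count + ((PySem.Int.bitLength n : Int) - 1) + m + 1  -- unreachable on Pre_ ∩ Dom
  | f + 1 =>
    if 1 < n ∧ 0 < m then
      solveAltLoop f (PySem.Int.floordiv (n + 1) 2)
        (if PySem.Int.mod n 2 ≠ 0 then m - 1 else m) (count + 1)
    else count + ((PySem.Int.bitLength n : Int) - 1) + m + 1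

def solve_alt (n : Int) (m : Int) : Int := solveAltLoop 64 n m 0

-- ===== PRECONDITION & SPEC =====
-- Pre_ excludes n ≤ 0, where Python's A recurses forever (RecursionError).
def Pre_solve (n : Int) (m : Int) : Prop := 1 ≤ n
instance (n : Int) (m : Int) : Decidable (Pre_solve n m) := by unfold Pre_solve; infer_instance
def pvWitness_solve : Int × Int := (6, 2)

def Spec_solve (n : Int) (m : Int) (out : Int) : Prop := out = solve_alt n m
instance (n : Int) (m : Int) (out : Int) : Decidable (Spec_solve n m out) := by unfold Spec_solve; infer_instance

-- ===== CLAIM (what is proved, stated in full; the proofs are below) =====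
def Claim_equal_solve : Prop := ∀ (n : Int) (m : Int), Dom_solve n m → Pre_solve n m → Spec_solve n m (solve n m)

-- ===== LEMMAS AND PROOFS =====
theorem bitLength_one : (PySem.Int.bitLength 1 : Int) = 1 := by decide

-- Once m ≤ 0, A's recursion just floor-halves n to 1: its value is bitLength n - 1 + m + 1.
theorem solveFuel_no_m (fuel : Nat) :
    ∀ (n m : Int), 1 ≤ n → n ≤ 2 ^ fuel → ¬ 0 < m →
      solveFuel fuel n m = ((PySem.Int.bitLength n : Int) - 1) + m + 1 := by
  induction fuel with
  | zero =>
    intro n m h1 h2 _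
    have hn : n = 1 := by simpa using le_antisymm h2 h1
    subst hn
    simp [solveFuel, bitLength_one]
  | succ f ih =>
    intro n m h1 h2 hm
    by_cases hn1 : n = 1
    · subst hn1; simp [solveFuel, bitLength_one]
    · have h2n : 2 ≤ n := by omega
      have hfd : PySem.Int.floordiv n 2 = n / 2 :=
        PySem.Int.floordiv_eq_ediv_of_pos (by omega)
      have hbl : (PySem.Int.bitLength n : Int) =
          (PySem.Int.bitLength (PySem.Int.floordiv n 2) : Int) + 1 := by
        rw [PySem.Int.bitLength_of_pos (by omega)]; push_cast; ring
      have hrec : 1 ≤ n / 2 ∧ n / 2 ≤ 2 ^ f := by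
        have : (2 : Int) ^ (f + 1) = 2 * 2 ^ f := by ring
        omega
      simp only [solveFuel, if_neg hn1, if_neg hm]
      split_ifs with hpar
      · rw [ih _ _ (hfd ▸ hrec.1) (hfd ▸ hrec.2) hm, hbl]; ring
      · rw [ih _ _ (hfd ▸ hrec.1) (hfd ▸ hrec.2) hm, hbl]; ring

-- The loop's accumulator plus the bit-length tail equals A's recursion.
theorem solveAltLoop_eq (fuel : Nat) :
    ∀ (n m count : Int), 1 ≤ n → n ≤ 2 ^ fuel →
      solveAltLoop fuel n m count = count + solveFuel fuel n m := by
  induction fuel with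
  | zero =>
    intro n m count h1 h2
    have hn : n = 1 := by simpa using le_antisymm h2 h1
    subst hn
    simp [solveAltLoop, solveFuel, bitLength_one]; ring
  | succ f ih =>
    intro n m count h1 h2
    by_cases hg : 1 < n ∧ 0 < m
    · have hn1 : n ≠ 1 := by omega
      have h2pow : (2 : Int) ^ (f + 1) = 2 * 2 ^ f := by ring
      have hmod : PySem.Int.mod n 2 = n % 2 := PySem.Int.mod_eq_emod_of_pos (by omega)
      have hfd : PySem.Int.floordiv n 2 = n / 2 :=
        PySem.Int.floordiv_eq_ediv_of_pos (by omega)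
      have hfd1 : PySem.Int.floordiv (n + 1) 2 = (n + 1) / 2 :=
        PySem.Int.floordiv_eq_ediv_of_pos (by omega)
      simp only [solveAltLoop, if_pos hg, solveFuel, if_neg hn1]
      by_cases hpar : PySem.Int.mod n 2 = 0
      · -- n even: (n+1)//2 = n//2
        have heq : (n + 1) / 2 = n / 2 := by omega
        rw [if_neg (by simpa using hpar), if_pos hpar, hfd1, heq, ← hfd,
          ih _ _ _ (by rw [hfd]; omega) (by rw [hfd]; omega)]
        ring
      · rw [if_pos hpar, if_neg (by simpa [hmod] using hpar), if_pos hg.2, hfd1,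
          ih _ _ _ (by omega) (by omega)]
        ring
    · simp only [solveAltLoop, if_neg hg]
      by_cases hn1 : n = 1
      · subst hn1; simp [solveFuel, bitLength_one]; ring
      · have hm : ¬ 0 < m := by omega
        rw [solveFuel_no_m (f + 1) n m h1 h2 hm]; ring

-- ===== VERDICT (by name: the statement is the Claim_ definition above) =====
theorem solve_spec : Claim_equal_solve := by
  intro n m hdom hpre
  show solve n m = solve_alt n m
  have hd : n ≤ 2 ^ 64 := by
    unfold Dom_solve pvDomInt at hdom
    simp only [Bool.and_eq_true, decide_eq_true_eq] at hdom
    have : (2147483648 : Int) ≤ 2 ^ 64 := by norm_num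
    omega
  rw [solve, solve_alt, solveAltLoop_eq 64 n m 0 hpre hd]
  ring
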